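-- pv_equiv track=rewrite | github.com/shameleon/codingame | Python_puzzles/hard/obsolete-programming/nested_condtions.py | get_condition_indexes
-- ===== SOURCE A (Python) =====
-- def get_condition_indexes(start_idx, tokens):
--     i = start_idx
--     k = -1
--     cond = dict(zip(['IF', 'ELSE', 'FI'], [None] * 3))
--     while i < len(tokens):
--         if tokens[i] == 'IF':
--             if cond['IF'] == None:
--                 cond['IF'] = i
--             k += 1
--         elif tokens[i] == 'ELSE':
--             if k == 0 and cond['ELSE'] == None:
--                 cond['ELSE'] = i
--         elif tokens[i] == 'FI':
--             if k == 0 and cond['FI'] == None: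
--                 cond['FI'] = i
--             k -= 1
--         i += 1
--     return cond
-- ===== SOURCE B (Python) =====
-- def get_condition_indexes(start_idx, tokens):
--     # Pass 1: depth table — (index, token, depth BEFORE the token), depth starts at -1.
--     table = []
--     d = -1
--     for i in range(start_idx, len(tokens)):
--         tok = tokens[i]
--         table.append((i, tok, d))
--         if tok == 'IF':
--             d += 1
--         elif tok == 'FI':
--             d -= 1
--     # Pass 2: three independent searches over the table (no early stop after the
--     # matching FI, so a later top-level ELSE is still found, like the original).
--     if_idx = next((i for i, t, _ in table if t == 'IF'), None)
--     else_idx = next((i for i, t, dep in table if t == 'ELSE' and dep == 0), None)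
--     fi_idx = next((i for i, t, dep in table if t == 'FI' and dep == 0), None)
--     return {'IF': if_idx, 'ELSE': else_idx, 'FI': fi_idx}
-- ===== Notes on version B (the rewrite author's own statement) =====
-- stated objective: alternative
-- what changed: Replaces the single stateful while-loop that mutates a dict and a nesting counter with a two-pass decomposition: first build a table of (index, token, depth-before-token), then obtain each of the three answers by an independent first-match search over that table.
import Mathlib
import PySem

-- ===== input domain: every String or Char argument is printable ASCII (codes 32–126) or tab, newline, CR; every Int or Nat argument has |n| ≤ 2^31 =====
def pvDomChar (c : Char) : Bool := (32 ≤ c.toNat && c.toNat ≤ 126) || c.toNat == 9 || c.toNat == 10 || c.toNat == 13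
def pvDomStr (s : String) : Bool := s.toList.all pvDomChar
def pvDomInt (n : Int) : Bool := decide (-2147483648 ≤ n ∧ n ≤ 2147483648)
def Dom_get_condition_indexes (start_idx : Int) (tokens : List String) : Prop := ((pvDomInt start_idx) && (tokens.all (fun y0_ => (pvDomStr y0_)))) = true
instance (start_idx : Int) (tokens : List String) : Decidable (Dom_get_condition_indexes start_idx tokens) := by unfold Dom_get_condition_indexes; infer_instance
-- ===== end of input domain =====

-- B replaces A's single stateful while-loop (dict mutation + nesting counter) by a two-pass
-- decomposition: build an (index, token, depth-before-token) table, then three independent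
-- first-match searches over it; same asymptotic cost, different structure.

-- ===== PORT A =====
def pvLoopA (tokens : List String) : Nat → Int → Int → PySem.Dict String (Option Int) → PySem.Dict String (Option Int)
  | 0, _, _, cond => cond
  | fuel+1, i, k, cond =>
    match PySem.List.pyGet? tokens i with
    | none => cond
    | some t =>
      if t = "IF" then
        let cond' := if cond.getD "IF" none = none then cond.insert "IF" (some i) else cond
        pvLoopA tokens fuel (i+1) (k+1) cond'
      else if t = "ELSE" then
        let cond' := if k = 0 ∧ cond.getD "ELSE" none = none then cond.insert "ELSE" (some i) else cond
        pvLoopA tokens fuel (i+1) k cond'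
      else if t = "FI" then
        let cond' := if k = 0 ∧ cond.getD "FI" none = none then cond.insert "FI" (some i) else cond
        pvLoopA tokens fuel (i+1) (k-1) cond'
      else pvLoopA tokens fuel (i+1) k cond

def get_condition_indexes (start_idx : Int) (tokens : List String) : List (String × Option Int) :=
  (pvLoopA tokens ((tokens.length - start_idx).toNat) start_idx (-1)
    (PySem.Dict.ofList [("IF", none), ("ELSE", none), ("FI", none)])).items

-- ===== PORT B =====
-- pass 1 of Source B: the depth table (index, token, depth before the token)
def pvTableB (tokens : List String) : Nat → Int → Int → List (Int × String × Int)
  | 0, _, _ => []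
  | fuel+1, i, d =>
    match PySem.List.pyGet? tokens i with
    | none => []  -- IndexError in Python; excluded by Pre_
    | some tok =>
      (i, tok, d) :: pvTableB tokens fuel (i+1)
        (if tok = "IF" then d+1 else if tok = "FI" then d-1 else d)

-- pass 2 of Source B: three independent first-match searches, then the result dict literal
def get_condition_indexes_alt (start_idx : Int) (tokens : List String) : List (String × Option Int) :=
  let table := pvTableB tokens ((tokens.length - start_idx).toNat) start_idx (-1)
  let ifIdx := (table.find? (fun e => e.2.1 == "IF")).map (·.1)
  let elseIdx := (table.find? (fun e => e.2.1 == "ELSE" && e.2.2 == 0)).map (·.1)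
  let fiIdx := (table.find? (fun e => e.2.1 == "FI" && e.2.2 == 0)).map (·.1)
  [("IF", ifIdx), ("ELSE", elseIdx), ("FI", fiIdx)]

-- ===== PRECONDITION & SPEC =====
-- Pre_ excludes exactly the inputs where Python A raises IndexError: a start_idx below
-- -len(tokens) makes tokens[i] go out of range on the first loop iteration.
def Pre_get_condition_indexes (start_idx : Int) (tokens : List String) : Prop :=
  -(tokens.length : Int) ≤ start_idx
instance (start_idx : Int) (tokens : List String) : Decidable (Pre_get_condition_indexes start_idx tokens) := by unfold Pre_get_condition_indexes; infer_instance

def pvWitness_get_condition_indexes : Int × List String := (0, ["IF", "x", "ELSE", "y", "FI"])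

def Spec_get_condition_indexes (start_idx : Int) (tokens : List String) (out : List (String × Option Int)) : Prop := out = get_condition_indexes_alt start_idx tokens
instance (start_idx : Int) (tokens : List String) (out : List (String × Option Int)) : Decidable (Spec_get_condition_indexes start_idx tokens out) := by unfold Spec_get_condition_indexes; infer_instance

-- ===== CLAIM (what is proved, stated in full; the proofs are below) =====
def Claim_equal_get_condition_indexes : Prop := ∀ (start_idx : Int) (tokens : List String), Dom_get_condition_indexes start_idx tokens → Pre_get_condition_indexes start_idx tokens → Spec_get_condition_indexes start_idx tokens (get_condition_indexes start_idx tokens)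

-- ===== LEMMAS AND PROOFS =====

-- "current value, else first later match": the shape A's first-write-wins updates take
def pvPick (a : Option Int) (r : Option (Int × String × Int)) : Option Int :=
  match a with
  | some v => some v
  | none => r.map (·.1)

-- dict operations of A computed on its fixed three-key literal dict
lemma pvIns_IF (i : Int) (a b c : Option Int) : (PySem.Dict.mk [("IF",a),("ELSE",b),("FI",c)]).insert "IF" (some i) = PySem.Dict.mk [("IF",some i),("ELSE",b),("FI",c)] := rfl
lemma pvIns_ELSE (i : Int) (a b c : Option Int) : (PySem.Dict.mk [("IF",a),("ELSE",b),("FI",c)]).insert "ELSE" (some i) = PySem.Dict.mk [("IF",a),("ELSE",some i),("FI",c)] := rfl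
lemma pvIns_FI (i : Int) (a b c : Option Int) : (PySem.Dict.mk [("IF",a),("ELSE",b),("FI",c)]).insert "FI" (some i) = PySem.Dict.mk [("IF",a),("ELSE",b),("FI",some i)] := rfl
lemma pvGetD_IF (a b c : Option Int) : (PySem.Dict.mk [("IF",a),("ELSE",b),("FI",c)]).getD "IF" none = a := rfl
lemma pvGetD_ELSE (a b c : Option Int) : (PySem.Dict.mk [("IF",a),("ELSE",b),("FI",c)]).getD "ELSE" none = b := rfl
lemma pvGetD_FI (a b c : Option Int) : (PySem.Dict.mk [("IF",a),("ELSE",b),("FI",c)]).getD "FI" none = c := rfl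

lemma pvLoopA_eq (tokens : List String) : ∀ (fuel : Nat) (i k : Int) (a b c : Option Int),
    fuel = ((tokens.length : Int) - i).toNat → -(tokens.length : Int) ≤ i →
    pvLoopA tokens fuel i k (PySem.Dict.mk [("IF", a), ("ELSE", b), ("FI", c)]) =
      PySem.Dict.mk
        [("IF", pvPick a ((pvTableB tokens fuel i k).find? (fun e => e.2.1 == "IF"))),
         ("ELSE", pvPick b ((pvTableB tokens fuel i k).find? (fun e => e.2.1 == "ELSE" && e.2.2 == 0))),
         ("FI", pvPick c ((pvTableB tokens fuel i k).find? (fun e => e.2.1 == "FI" && e.2.2 == 0)))] := by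
  intro fuel
  induction fuel with
  | zero =>
    intro i k a b c _ _
    simp [pvLoopA, pvTableB]
    cases a <;> cases b <;> cases c <;> simp [pvPick]
  | succ fuel ih =>
    intro i k a b c hfuel hge
    have hlt : i < (tokens.length : Int) := by omega
    have hfuel' : fuel = ((tokens.length : Int) - (i+1)).toNat := by omega
    have hge' : -(tokens.length : Int) ≤ i + 1 := by omega
    obtain ⟨t, ht⟩ : ∃ t, PySem.List.pyGet? tokens i = some t := by
      cases h : PySem.List.pyGet? tokens i with
      | none =>
        rw [PySem.List.pyGet?_eq_none_iff] at h
        exact absurd (by constructor <;> omega : PySem.Raise.InRange tokens.length i) h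
      | some t => exact ⟨t, rfl⟩
    have IH : ∀ (k' : Int) (a b c : Option Int),
        pvLoopA tokens fuel (i+1) k' (PySem.Dict.mk [("IF", a), ("ELSE", b), ("FI", c)]) =
          PySem.Dict.mk
            [("IF", pvPick a ((pvTableB tokens fuel (i+1) k').find? (fun e => e.2.1 == "IF"))),
             ("ELSE", pvPick b ((pvTableB tokens fuel (i+1) k').find? (fun e => e.2.1 == "ELSE" && e.2.2 == 0))),
             ("FI", pvPick c ((pvTableB tokens fuel (i+1) k').find? (fun e => e.2.1 == "FI" && e.2.2 == 0)))] :=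
      fun k' a b c => ih (i+1) k' a b c hfuel' hge'
    by_cases hIF : t = "IF"
    · subst hIF
      cases a with
      | none =>
        simp only [pvLoopA, pvTableB, ht, pvGetD_IF, pvIns_IF, IH]
        simp [pvPick, List.find?, IH]
      | some v =>
        simp only [pvLoopA, pvTableB, ht, pvGetD_IF, pvIns_IF, IH]
        simp [pvPick, List.find?, IH]
    · by_cases hEL : t = "ELSE"
      · subst hEL
        simp only [pvLoopA, pvTableB, ht, pvGetD_ELSE, pvIns_ELSE, IH, hIF]
        by_cases hk : k = 0
        · subst hk
          cases b <;> simp [pvPick, List.find?, IH]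
        · have hkb : (k == 0) = false := by simp [hk]
          cases b <;> simp [pvPick, List.find?, hk, hkb, IH]
      · by_cases hFI : t = "FI"
        · subst hFI
          simp only [pvLoopA, pvTableB, ht, pvGetD_FI, pvIns_FI, IH, hIF, hEL]
          by_cases hk : k = 0
          · subst hk
            cases c <;> simp [pvPick, List.find?, IH]
          · have hkb : (k == 0) = false := by simp [hk]
            cases c <;> simp [pvPick, List.find?, hk, hkb, IH]
        · have h1 : (t == "IF") = false := by simp [hIF]
          have h2 : (t == "ELSE") = false := by simp [hEL]
          have h3 : (t == "FI") = false := by simp [hFI]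
          simp only [pvLoopA, pvTableB, ht, IH, hIF, hEL, hFI]
          simp [pvPick, List.find?, h1, h2, h3]

-- ===== VERDICT (by name: the statement is the Claim_ definition above) =====
theorem get_condition_indexes_spec : Claim_equal_get_condition_indexes := by
  intro start_idx tokens _ hpre
  unfold Spec_get_condition_indexes get_condition_indexes get_condition_indexes_alt
  rw [show PySem.Dict.ofList [("IF", (none : Option Int)), ("ELSE", none), ("FI", none)] =
        PySem.Dict.mk [("IF", none), ("ELSE", none), ("FI", none)] from rfl]
  by_cases hs : -(tokens.length : Int) ≤ start_idx
  · rw [pvLoopA_eq tokens _ start_idx (-1) none none none rfl hs]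
    simp [pvPick]
  · exact absurd hpre hs
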